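-- pv_equiv track=rewrite | github.com/cristian2213/Statistical-Topics | section-01/histogram/question-06.py | generate_bin_intervals
-- ===== SOURCE A (Python) =====
-- def generate_bin_intervals(min_value, bin_width, class_num):
--     intervals = []
--     # interval [0-4], [4,8], [8,12], [12,16]
--     min_interval = min_value
--     for i in range(class_num):
--         upper_bound = min_interval + bin_width
--         intervals.append((min_interval, upper_bound))
--         min_interval = upper_bound
--     return intervals
-- ===== SOURCE B (Python) =====
-- def generate_bin_intervals(min_value, bin_width, class_num):
--     boundaries = [min_value]
--     for _ in range(class_num):
--         boundaries.append(boundaries[-1] + bin_width)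
--     return list(zip(boundaries, boundaries[1:]))
-- ===== Notes on version B (the rewrite author's own statement) =====
-- stated objective: alternative
-- what changed: Replaces the fused accumulator loop (appending each pair while carrying the running lower bound) with a build-the-boundary-table-then-pair shape: first accumulate the class_num+1 boundary points by repeated addition, then pair consecutive boundaries with zip.
import Mathlib
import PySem

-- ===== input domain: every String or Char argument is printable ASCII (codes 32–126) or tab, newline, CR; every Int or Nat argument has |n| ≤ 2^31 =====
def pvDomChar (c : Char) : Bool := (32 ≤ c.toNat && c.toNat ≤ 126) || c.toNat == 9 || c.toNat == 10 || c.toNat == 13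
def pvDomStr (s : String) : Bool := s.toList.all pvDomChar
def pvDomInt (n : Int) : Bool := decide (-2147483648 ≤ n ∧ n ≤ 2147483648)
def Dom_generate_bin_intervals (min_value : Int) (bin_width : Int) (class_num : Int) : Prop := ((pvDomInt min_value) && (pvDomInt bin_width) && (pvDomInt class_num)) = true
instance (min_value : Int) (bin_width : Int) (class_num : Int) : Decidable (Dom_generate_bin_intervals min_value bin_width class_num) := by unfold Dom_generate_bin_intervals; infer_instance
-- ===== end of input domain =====

-- B builds the boundary table by repeated addition and pairs consecutive boundaries with zip,
-- instead of A's fused accumulator loop (objective: alternative decomposition, same cost).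

-- ===== PORT A =====
-- fused loop: carry (intervals, min_interval), append one pair per iteration
def generate_bin_intervals (min_value : Int) (bin_width : Int) (class_num : Int) : List (Int × Int) :=
  let init : List (Int × Int) × Int := ([], min_value)
  let r := (PySem.List.pyRange 0 class_num 1).foldl
    (fun st _ =>
      let upper_bound := st.2 + bin_width
      (st.1 ++ [(st.2, upper_bound)], upper_bound)) init
  r.1

-- ===== PORT B =====
-- first build the boundary list (boundaries[-1] + bin_width each step), then zip it with its tail
def generate_bin_intervals_alt (min_value : Int) (bin_width : Int) (class_num : Int) : List (Int × Int) :=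
  let boundaries := (PySem.List.pyRange 0 class_num 1).foldl
    (fun bs _ => bs ++ [PySem.List.pyGetD bs (-1) 0 + bin_width]) [min_value]
  boundaries.zip (PySem.List.slice boundaries (some 1) none)

-- ===== PRECONDITION & SPEC =====
def Spec_generate_bin_intervals (min_value : Int) (bin_width : Int) (class_num : Int) (out : List (Int × Int)) : Prop := out = generate_bin_intervals_alt min_value bin_width class_num
instance (min_value : Int) (bin_width : Int) (class_num : Int) (out : List (Int × Int)) : Decidable (Spec_generate_bin_intervals min_value bin_width class_num out) := by unfold Spec_generate_bin_intervals; infer_instance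

-- ===== CLAIM (what is proved, stated in full; the proofs are below) =====
def Claim_equal_generate_bin_intervals : Prop := ∀ (min_value : Int) (bin_width : Int) (class_num : Int), Dom_generate_bin_intervals min_value bin_width class_num → Spec_generate_bin_intervals min_value bin_width class_num (generate_bin_intervals min_value bin_width class_num)

-- ===== LEMMAS AND PROOFS =====

-- reference: the chain of boundary points starting at m, n+1 of them
def pvChain (w : Int) : Int → Nat → List Int
  | m, 0 => [m]
  | m, n+1 => m :: pvChain w (m + w) n

-- A's fold characterised
theorem pvA_fold (w : Int) (l : List Int) :
    ∀ (acc : List (Int × Int)) (m : Int),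
    (l.foldl (fun st (_ : Int) =>
        let upper_bound := st.2 + w
        (st.1 ++ [(st.2, upper_bound)], upper_bound)) (acc, m)).1
      = acc ++ (pvChain w m l.length).zip (pvChain w m l.length).tail := by
  induction l with
  | nil => intro acc m; simp [pvChain]
  | cons x xs ih =>
    intro acc m
    simp only [List.foldl_cons, List.length_cons, pvChain, ih]
    cases h : xs.length with
    | zero => simp [pvChain]
    | succ n => simp [pvChain]

-- B's boundary fold characterised
theorem pvB_fold (w : Int) (l : List Int) :
    ∀ (bs : List Int) (m : Int), PySem.List.pyGetD bs (-1) 0 = m → bs ≠ [] →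
    (l.foldl (fun bs' (_ : Int) => bs' ++ [PySem.List.pyGetD bs' (-1) 0 + w]) bs)
      = bs.dropLast ++ pvChain w m l.length := by
  induction l with
  | nil =>
    intro bs m hlast hne
    simp only [List.foldl_nil]
    rw [PySem.List.pyGetD_neg_one bs 0 hne] at hlast
    rw [← hlast]
    exact (List.dropLast_append_getLast hne).symm
  | cons x xs ih =>
    intro bs m hlast hne
    have hlast' : bs.getLast hne = m := by
      rw [PySem.List.pyGetD_neg_one bs 0 hne] at hlast; exact hlast
    have hbs : bs = bs.dropLast ++ [m] := by
      conv_lhs => rw [← List.dropLast_append_getLast hne, hlast']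
    simp only [List.foldl_cons, List.length_cons]
    rw [hlast, ih (bs ++ [m + w]) (m + w)
        (PySem.List.pyGetD_neg_one_append_singleton ..) (by simp),
      List.dropLast_concat]
    conv_lhs => rw [hbs]
    simp [pvChain]

theorem pv_ports_eq (min_value bin_width class_num : Int) :
    generate_bin_intervals min_value bin_width class_num
      = generate_bin_intervals_alt min_value bin_width class_num := by
  unfold generate_bin_intervals generate_bin_intervals_alt
  simp only []
  rw [pvA_fold, pvB_fold bin_width _ [min_value] min_value (by simp [PySem.List.pyGetD_neg_one]) (by simp)]
  simp [PySem.List.slice_from_one]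

-- ===== VERDICT (by name: the statement is the Claim_ definition above) =====
theorem generate_bin_intervals_spec : Claim_equal_generate_bin_intervals := by
  intro m w c _
  exact pv_ports_eq m w c
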